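-- pv_equiv track=rewrite | github.com/simantunes008/EngWeb2024 | TPC3/src/toJsonDB.py | calc_generos
-- ===== SOURCE A (Python) =====
-- def calc_generos(db):
--     generos = {}
--     counter = 1
--     for reg in db:
--         if "genres" in reg and len(reg["genres"]) > 0:
--             for genero in reg["genres"]:
--                 genero = genero.strip()
--                 if genero not in generos:
--                     generos[genero] = f"g{counter}"
--                     counter += 1
--     return generos
-- ===== SOURCE B (Python) =====
-- def calc_generos(db):
--     nomes = [g.strip()
--              for reg in db
--              if "genres" in reg and len(reg["genres"]) > 0
--              for g in reg["genres"]]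
--     firsts = [g for i, g in enumerate(nomes) if g not in nomes[:i]]
--     return {g: f"g{k}" for k, g in enumerate(firsts, 1)}
-- ===== Notes on version B (the rewrite author's own statement) =====
-- stated objective: alternative
-- what changed: Replaces A's incremental dict-as-seen-set scan with a staged pipeline: flatten and strip all genre names, then keep each occurrence only if it is absent from the list's own prefix (first-occurrence brute-force scan, no dict/set maintained), then number the survivors with enumerate(.., 1).
import Mathlib
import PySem

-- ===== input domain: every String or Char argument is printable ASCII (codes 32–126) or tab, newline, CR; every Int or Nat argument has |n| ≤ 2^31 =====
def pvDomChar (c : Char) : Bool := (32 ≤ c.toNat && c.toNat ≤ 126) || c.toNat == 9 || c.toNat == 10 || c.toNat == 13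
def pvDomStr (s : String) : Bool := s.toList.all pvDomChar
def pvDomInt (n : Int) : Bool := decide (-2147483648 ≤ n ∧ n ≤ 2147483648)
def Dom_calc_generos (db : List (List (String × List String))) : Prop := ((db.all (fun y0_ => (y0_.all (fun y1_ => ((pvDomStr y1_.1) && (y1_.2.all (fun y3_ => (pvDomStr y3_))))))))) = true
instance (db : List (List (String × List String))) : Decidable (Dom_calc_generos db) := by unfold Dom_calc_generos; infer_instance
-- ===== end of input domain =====

-- B replaces A's incremental dict-as-seen-set scan by a staged pipeline whose dedup step
-- keeps an occurrence iff it is absent from the list's own prefix; alternative, same results.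

-- ===== PORT A =====
-- inner loop body of A: strip, then insert with the running counter if unseen
def pvStepA (st : PySem.Dict String String × Int) (g : String) : PySem.Dict String String × Int :=
  let g := PySem.Str.strip g
  if st.1.contains g then st
  else (st.1.insert g ("g" ++ PySem.Int.toStr st.2), st.2 + 1)

def calc_generos (db : List (List (String × List String))) : List (String × String) :=
  (db.foldl (fun st reg =>
      match (PySem.Dict.mk reg).get? "genres" with
      | some gs => if gs.length > 0 then gs.foldl pvStepA st else st
      | none => st)
    (PySem.Dict.empty, 1)).1.items

-- ===== PORT B =====
def calc_generos_alt (db : List (List (String × List String))) : List (String × String) :=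
  let nomes := db.flatMap (fun reg =>
    match (PySem.Dict.mk reg).get? "genres" with
    | some gs => if gs.length > 0 then gs.map PySem.Str.strip else []
    | none => [])
  let firsts := ((PySem.List.enumerate nomes 0).filter
      (fun p => !((PySem.List.slice nomes none (some p.1)).contains p.2))).map Prod.snd
  (PySem.List.enumerate firsts 1).map (fun p => (p.2, "g" ++ PySem.Int.toStr p.1))

-- ===== PRECONDITION & SPEC =====
def Spec_calc_generos (db : List (List (String × List String))) (out : List (String × String)) : Prop := out = calc_generos_alt db
instance (db : List (List (String × List String))) (out : List (String × String)) : Decidable (Spec_calc_generos db out) := by unfold Spec_calc_generos; infer_instance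

-- ===== CLAIM (what is proved, stated in full; the proofs are below) =====
def Claim_equal_calc_generos : Prop := ∀ (db : List (List (String × List String))), Dom_calc_generos db → Spec_calc_generos db (calc_generos db)

-- ===== LEMMAS AND PROOFS =====

-- numbering from n : what A's inserts append for a run of fresh distinct keys
def pvNum (n : Int) : List String → List (String × String)
  | [] => []
  | g :: ks => (g, "g" ++ PySem.Int.toStr n) :: pvNum (n + 1) ks

-- the keys of l that are fresh w.r.t. seen, deduplicated, in order
def pvFresh (seen : List String) : List String → List String
  | [] => []
  | g :: l => if g ∈ seen then pvFresh seen l else g :: pvFresh (seen ++ [g]) l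

theorem pvFoldStep (l : List String) (d : PySem.Dict String String) (n : Int) :
    ((l.foldl pvStepA (d, n)).1).items
        = d.items ++ pvNum n (pvFresh d.keys (l.map PySem.Str.strip))
    ∧ ((l.foldl pvStepA (d, n)).1).keys
        = d.keys ++ pvFresh d.keys (l.map PySem.Str.strip)
    ∧ (l.foldl pvStepA (d, n)).2
        = n + (pvFresh d.keys (l.map PySem.Str.strip)).length := by
  induction l generalizing d n with
  | nil => simp [pvNum, pvFresh]
  | cons g l ih =>
    simp only [List.foldl_cons, List.map_cons, pvStepA]
    by_cases h : d.contains (PySem.Str.strip g) = true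
    · have hm : PySem.Str.strip g ∈ d.keys := (PySem.Dict.contains_iff_mem_keys d _).mp h
      simp only [h, if_pos, pvFresh, hm]
      exact ih d n
    · have hb : d.contains (PySem.Str.strip g) = false := by
        simpa using h
      have hm : PySem.Str.strip g ∉ d.keys := fun hc =>
        h ((PySem.Dict.contains_iff_mem_keys d _).mpr hc)
      simp only [hb, Bool.false_eq_true, pvFresh, hm, ite_false]
      obtain ⟨hi, hk, hc⟩ :=
        ih (d.insert (PySem.Str.strip g) ("g" ++ PySem.Int.toStr n)) (n + 1)
      rw [PySem.Dict.items_insert_of_not_contains d _ hb, PySem.Dict.keys_insert_of_not_contains d _ hb] at hi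
      rw [PySem.Dict.keys_insert_of_not_contains d _ hb] at hk
      rw [PySem.Dict.keys_insert_of_not_contains d _ hb] at hc
      refine ⟨?_, ?_, ?_⟩
      · rw [hi]; simp [pvNum]
      · rw [hk]; simp
      · rw [hc]; simp; ring

theorem pvNum_enum (ks : List String) (n : Int) :
    (PySem.List.enumerate ks n).map (fun p => (p.2, "g" ++ PySem.Int.toStr p.1)) = pvNum n ks := by
  induction ks generalizing n with
  | nil => simp [PySem.List.enumerate_nil, pvNum]
  | cons g ks ih => simp [PySem.List.enumerate_cons, pvNum, ih]

theorem pvFresh_append (a b seen : List String) :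
    pvFresh seen (a ++ b) = pvFresh seen a ++ pvFresh (seen ++ pvFresh seen a) b := by
  induction a generalizing seen with
  | nil => simp [pvFresh]
  | cons g a ih =>
    by_cases h : g ∈ seen
    · simp only [List.cons_append, pvFresh, h, if_true]
      exact ih seen
    · simp only [List.cons_append, pvFresh, h, if_false]
      rw [ih (seen ++ [g])]
      simp [List.append_assoc]

theorem pvNum_append (a b : List String) (n : Int) :
    pvNum n (a ++ b) = pvNum n a ++ pvNum (n + a.length) b := by
  induction a generalizing n with
  | nil => simp [pvNum]
  | cons g a ih =>
    simp only [List.cons_append, pvNum, ih]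
    have : n + 1 + (a.length : Int) = n + ((g :: a).length : Int) := by
      simp; ring
    rw [this]

-- B's prefix-membership dedup equals pvFresh, generalized over an already-consumed prefix
theorem pvPrefixFilter (l : List String) : ∀ (pre s : List String), (∀ x, x ∈ s ↔ x ∈ pre) →
    (((PySem.List.enumerate l (pre.length : Int)).filter
        (fun p => !((PySem.List.slice (pre ++ l) none (some p.1)).contains p.2))).map Prod.snd)
      = pvFresh s l := by
  induction l with
  | nil => intro pre s hs; simp [PySem.List.enumerate_nil, pvFresh]
  | cons g t ih =>
    intro pre s hs
    rw [PySem.List.enumerate_cons]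
    have hsl : PySem.List.slice (pre ++ g :: t) none (some (pre.length : Int)) = pre := by
      rw [PySem.List.slice_to_natCast]
      exact List.take_left' rfl
    have happ : pre ++ g :: t = (pre ++ [g]) ++ t := by simp
    have hlen : (pre.length : Int) + 1 = (((pre ++ [g]).length : Nat) : Int) := by simp
    have htail : ∀ (s' : List String), (∀ x, x ∈ s' ↔ x ∈ pre ++ [g]) →
        (((PySem.List.enumerate t ((pre.length : Int) + 1)).filter
            (fun p => !((PySem.List.slice (pre ++ g :: t) none (some p.1)).contains p.2))).map Prod.snd)
          = pvFresh s' t := by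
      intro s' hs'
      rw [happ, hlen]
      exact ih (pre ++ [g]) s' hs'
    rw [List.filter_cons]
    by_cases h : g ∈ pre
    · have hsg : g ∈ s := (hs g).mpr h
      have hcond : (!((PySem.List.slice (pre ++ g :: t) none
            (some (pre.length : Int))).contains g)) = false := by
        rw [hsl]; simp [h]
      simp only [hcond, Bool.false_eq_true, if_false]
      rw [pvFresh, if_pos hsg]
      exact htail s (fun x => by
        constructor
        · intro hx; exact List.mem_append.mpr (Or.inl ((hs x).mp hx))
        · intro hx
          rcases List.mem_append.mp hx with hx | hx
          · exact (hs x).mpr hx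
          · simp at hx; subst hx; exact hsg)
    · have hsg : g ∉ s := fun hx => h ((hs g).mp hx)
      have hcond : (!((PySem.List.slice (pre ++ g :: t) none
            (some (pre.length : Int))).contains g)) = true := by
        rw [hsl]; simp [h]
      simp only [hcond, if_true]
      rw [List.map_cons, pvFresh, if_neg hsg]
      congr 1
      exact htail (s ++ [g]) (fun x => by
        simp only [List.mem_append, List.mem_singleton]
        exact or_congr (hs x) Iff.rfl)

def pvNomes (db : List (List (String × List String))) : List String :=
  db.flatMap (fun reg =>
    match (PySem.Dict.mk reg).get? "genres" with
    | some gs => if gs.length > 0 then gs.map PySem.Str.strip else []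
    | none => [])

theorem pvFoldDbGen (db : List (List (String × List String)))
    (d : PySem.Dict String String) (n : Int) :
    ((db.foldl (fun st reg =>
        match (PySem.Dict.mk reg).get? "genres" with
        | some gs => if gs.length > 0 then gs.foldl pvStepA st else st
        | none => st) (d, n)).1).items
        = d.items ++ pvNum n (pvFresh d.keys (pvNomes db))
    ∧ ((db.foldl (fun st reg =>
        match (PySem.Dict.mk reg).get? "genres" with
        | some gs => if gs.length > 0 then gs.foldl pvStepA st else st
        | none => st) (d, n)).1).keys
        = d.keys ++ pvFresh d.keys (pvNomes db)
    ∧ (db.foldl (fun st reg =>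
        match (PySem.Dict.mk reg).get? "genres" with
        | some gs => if gs.length > 0 then gs.foldl pvStepA st else st
        | none => st) (d, n)).2
        = n + (pvFresh d.keys (pvNomes db)).length := by
  induction db generalizing d n with
  | nil => simp [pvNomes, pvFresh, pvNum]
  | cons reg db ih =>
    simp only [List.foldl_cons]
    have hnomes : pvNomes (reg :: db)
        = (match (PySem.Dict.mk reg).get? "genres" with
           | some gs => if gs.length > 0 then gs.map PySem.Str.strip else []
           | none => []) ++ pvNomes db := by
      simp [pvNomes]
    cases hg : (PySem.Dict.mk reg).get? "genres" with
    | none =>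
      simp only [hg] at hnomes ⊢
      simp only [List.nil_append] at hnomes
      rw [hnomes]
      exact ih d n
    | some gs =>
      simp only [hg] at hnomes ⊢
      by_cases hlen : gs.length > 0
      · simp only [hlen, if_true] at hnomes ⊢
        obtain ⟨hi1, hk1, hc1⟩ := pvFoldStep gs d n
        obtain ⟨hi2, hk2, hc2⟩ := ih (gs.foldl pvStepA (d, n)).1 (gs.foldl pvStepA (d, n)).2
        rw [hnomes, pvFresh_append]
        have hpair : (gs.foldl pvStepA (d, n))
            = ((gs.foldl pvStepA (d, n)).1, (gs.foldl pvStepA (d, n)).2) := rfl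
        rw [hpair]
        refine ⟨?_, ?_, ?_⟩
        · rw [hi2, hi1, hk1, hc1, pvNum_append, List.append_assoc]
        · rw [hk2, hk1, List.append_assoc]
        · rw [hc2, hc1, hk1]
          push_cast [List.length_append]; ring
      · simp only [hlen, if_false] at hnomes ⊢
        simp only [List.nil_append] at hnomes
        rw [hnomes]
        exact ih d n

theorem pvFoldDb (db : List (List (String × List String))) :
    calc_generos db = calc_generos_alt db := by
  unfold calc_generos calc_generos_alt
  obtain ⟨hi, -, -⟩ := pvFoldDbGen db PySem.Dict.empty 1
  rw [hi]
  have he : (PySem.Dict.empty : PySem.Dict String String).items = [] := rfl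
  have hk : (PySem.Dict.empty : PySem.Dict String String).keys = [] := rfl
  rw [he, hk, List.nil_append]
  have hfirsts := pvPrefixFilter (pvNomes db) [] [] (by simp)
  simp only [List.length_nil, Nat.cast_zero, List.nil_append] at hfirsts
  show pvNum 1 (pvFresh [] (pvNomes db))
      = (PySem.List.enumerate (((PySem.List.enumerate (pvNomes db) 0).filter
          (fun p => !((PySem.List.slice (pvNomes db) none (some p.1)).contains p.2))).map Prod.snd) 1).map
          (fun p => (p.2, "g" ++ PySem.Int.toStr p.1))
  rw [hfirsts, pvNum_enum]

-- ===== VERDICT (by name: the statement is the Claim_ definition above) =====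
theorem calc_generos_spec : Claim_equal_calc_generos := by
  intro db _
  exact pvFoldDb db
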